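-- pv_equiv track=rewrite | github.com/jaejae2374/CodingTest | kakao/주사위고르기/solution.py | solution
-- ===== SOURCE A (Python) =====
-- from itertools import combinations, product
-- from collections import Counter
--
-- def solution(dice):
--     n = len(dice)
--     dices = set(range(1, n+1))
--     cases = list(combinations(range(1, n+1), n//2))
--     cases = cases[:len(cases)//2]
--     max_wins = 0; answer = None
--     for diceA in cases:
--         diceB = list(dices-set(diceA))
--         diceA_list = [dice[d-1] for d in diceA]
--         diceB_list = [dice[d-1] for d in diceB]
--         diceA_sum = [sum(d) for d in product(*diceA_list)]
--         diceB_sum = [sum(d) for d in product(*diceB_list)]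
--         dictA = Counter(diceA_sum); dictB = Counter(diceB_sum)
--         winsA = 0; winsB = 0
--         for ka, va in dictA.items():
--             for kb, vb in dictB.items():
--                 if ka>kb:
--                     winsA+=va*vb
--                 elif ka<kb:
--                     winsB+=va*vb
--         if winsA>winsB and winsA>max_wins:
--             max_wins = winsA; answer = list(diceA)
--         elif winsB>winsA and winsB>max_wins:
--             max_wins = winsB; answer = diceB
--     answer.sort()
--     return answer
-- ===== SOURCE B (Python) =====
-- from itertools import combinations
--
-- def solution(dice):
--     n = len(dice)
--
--     def dist(idxs):
--         # distribution of sums via convolution of per-die face counts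
--         d = {0: 1}
--         for i in idxs:
--             nd = {}
--             for s, c in d.items():
--                 for f in dice[i - 1]:
--                     nd[s + f] = nd.get(s + f, 0) + c
--             d = nd
--         return d
--
--     cases = list(combinations(range(1, n + 1), n // 2))
--     cases = cases[:len(cases) // 2]
--     max_wins = 0
--     answer = None
--     for diceA in cases:
--         diceB = [i for i in range(1, n + 1) if i not in diceA]
--         dA = dist(diceA)
--         dB = dist(diceB)
--         winsA = sum(va * sum(vb for kb, vb in dB.items() if kb < ka)
--                     for ka, va in dA.items())
--         winsB = sum(va * sum(vb for kb, vb in dB.items() if kb > ka)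
--                     for ka, va in dA.items())
--         if winsA > winsB and winsA > max_wins:
--             max_wins = winsA
--             answer = list(diceA)
--         elif winsB > winsA and winsB > max_wins:
--             max_wins = winsB
--             answer = diceB
--     answer.sort()
--     return answer
-- ===== Notes on version B (the rewrite author's own statement) =====
-- stated objective: alternative
-- what changed: B computes each half's sum distribution by convolving per-die face-count dicts instead of enumerating every face tuple with itertools.product and Counter, and compares the two distributions by summing over dict items directly; it enumerates exponentially fewer states when face values repeat or sums collide, but the measured cost on random wide-valued dice is the same.
import Mathlib
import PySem

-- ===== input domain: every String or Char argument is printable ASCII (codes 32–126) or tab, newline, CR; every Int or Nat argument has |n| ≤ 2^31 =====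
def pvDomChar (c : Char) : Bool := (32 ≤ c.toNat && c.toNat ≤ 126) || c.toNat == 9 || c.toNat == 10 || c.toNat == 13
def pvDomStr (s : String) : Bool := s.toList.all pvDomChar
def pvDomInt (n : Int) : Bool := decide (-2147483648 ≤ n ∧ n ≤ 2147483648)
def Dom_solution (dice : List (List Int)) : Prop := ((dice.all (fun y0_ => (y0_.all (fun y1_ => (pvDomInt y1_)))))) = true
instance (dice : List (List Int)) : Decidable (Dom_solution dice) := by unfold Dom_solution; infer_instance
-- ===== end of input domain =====

-- B replaces A's enumeration of all face tuples (itertools.product + Counter) by a dict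
-- convolution of per-die face distributions (objective: alternative; equal values everywhere A returns).

-- ===== PORT A =====
-- hand port of itertools.product(*lists): exact CPython order (leftmost factor varies slowest)
def pyProd : List (List Int) → List (List Int)
  | [] => [[]]
  | l :: ls => l.flatMap (fun x => (pyProd ls).map (fun t => x :: t))

-- the nested 'for ka, va in dictA.items(): for kb, vb in dictB.items():' loop of A
def winsLoopA (dictA dictB : PySem.Dict Int Int) : Int × Int :=
  dictA.items.foldl (fun w p =>
    dictB.items.foldl (fun w q =>
      if p.1 > q.1 then (w.1 + p.2 * q.2, w.2)
      else if p.1 < q.1 then (w.1, w.2 + p.2 * q.2)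
      else w) w) (0, 0)

-- one iteration of A's 'for diceA in cases:' loop; state = (max_wins, answer).
-- dice[d-1] is ported with pyGetD: d ranges over 1..n, so the index is always in range.
def caseStepA (dice : List (List Int)) (n : Int) (st : Int × Option (List Int))
    (diceA : List Int) : Int × Option (List Int) :=
  let diceB := PySem.Set.diff (PySem.Set.ofList (PySem.List.pyRange 1 (n+1) 1)) (PySem.Set.ofList diceA)
  let diceAList := diceA.map (fun d => PySem.List.pyGetD dice (d-1) [])
  let diceBList := diceB.map (fun d => PySem.List.pyGetD dice (d-1) [])
  let dictA := PySem.Dict.counter ((pyProd diceAList).map List.sum)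
  let dictB := PySem.Dict.counter ((pyProd diceBList).map List.sum)
  let w := winsLoopA dictA dictB
  if w.1 > w.2 ∧ w.1 > st.1 then (w.1, some diceA)
  else if w.2 > w.1 ∧ w.2 > st.1 then (w.2, some diceB)
  else st

def solution (dice : List (List Int)) : List Int :=
  let n : Int := dice.length
  let cases0 := PySem.List.combinations (PySem.List.pyRange 1 (n+1) 1) (dice.length / 2)
  let cases := PySem.List.slice cases0 none (some (PySem.Int.floordiv cases0.length 2))
  let st := cases.foldl (caseStepA dice n) (0, none)
  match st.2 with
  | some answer => PySem.List.sorted answer (fun x => x) false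
  | none => []    -- Python raises AttributeError here (answer is None); excluded by Pre_solution

-- ===== PORT B =====
-- one convolution step of Source B's dist(): fold the faces of die i into the sum distribution
def distStepB (dice : List (List Int)) (d : PySem.Dict Int Int) (i : Int) : PySem.Dict Int Int :=
  d.items.foldl (fun nd p =>
    (PySem.List.pyGetD dice (i-1) []).foldl (fun nd f => nd.modify (p.1 + f) 0 (· + p.2)) nd)
    PySem.Dict.empty

def distB (dice : List (List Int)) (idxs : List Int) : PySem.Dict Int Int :=
  idxs.foldl (distStepB dice) (PySem.Dict.empty.insert 0 1)

-- Source B's two comprehension sums over the dicts' items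
def winsAB (dA dB : PySem.Dict Int Int) : Int × Int :=
  ((dA.items.map (fun p => p.2 * ((dB.items.filter (fun q => q.1 < p.1)).map (fun q => q.2)).sum)).sum,
   (dA.items.map (fun p => p.2 * ((dB.items.filter (fun q => p.1 < q.1)).map (fun q => q.2)).sum)).sum)

def caseStepB (dice : List (List Int)) (n : Int) (st : Int × Option (List Int))
    (diceA : List Int) : Int × Option (List Int) :=
  let diceB := (PySem.List.pyRange 1 (n+1) 1).filter (fun i => !(diceA.contains i))
  let dA := distB dice diceA
  let dB := distB dice diceB
  let w := winsAB dA dB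
  if w.1 > w.2 ∧ w.1 > st.1 then (w.1, some diceA)
  else if w.2 > w.1 ∧ w.2 > st.1 then (w.2, some diceB)
  else st

def solution_alt (dice : List (List Int)) : List Int :=
  let n : Int := dice.length
  let cases0 := PySem.List.combinations (PySem.List.pyRange 1 (n+1) 1) (dice.length / 2)
  let cases := PySem.List.slice cases0 none (some (PySem.Int.floordiv cases0.length 2))
  let st := cases.foldl (caseStepB dice n) (0, none)
  match st.2 with
  | some answer => PySem.List.sorted answer (fun x => x) false
  | none => []

-- ===== PRECONDITION & SPEC =====
-- number of pairs (a, b) ∈ X × Y with b < a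
def pairsGT (X Y : List Int) : Int := (X.map (fun a => ((Y.countP (fun b => b < a)) : Int))).sum

-- multiset of attainable sums of one face from each listed die (1-based indices)
def sumsOfCase (dice : List (List Int)) (idxs : List Int) : List Int :=
  idxs.foldl (fun acc d => acc.flatMap (fun s => (PySem.List.pyGetD dice (d-1) []).map (fun f => s + f))) [0]

-- Pre_ excludes exactly the inputs on which every candidate split of the dice ties
-- (winsA = winsB for every case), where A's 'answer' stays None and A raises AttributeError.
def Pre_solution (dice : List (List Int)) : Prop :=
  ((PySem.List.combinations (PySem.List.pyRange 1 ((dice.length : Int)+1) 1) (dice.length / 2)).take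
      ((PySem.List.combinations (PySem.List.pyRange 1 ((dice.length : Int)+1) 1) (dice.length / 2)).length / 2)).any
    (fun c =>
      let sA := sumsOfCase dice c
      let sB := sumsOfCase dice ((PySem.List.pyRange 1 ((dice.length : Int)+1) 1).filter (fun i => !(c.contains i)))
      pairsGT sA sB != pairsGT sB sA) = true
instance (dice : List (List Int)) : Decidable (Pre_solution dice) := by unfold Pre_solution; infer_instance

def pvWitness_solution : List (List Int) := [[1], [2]]

def Spec_solution (dice : List (List Int)) (out : List Int) : Prop := out = solution_alt dice
instance (dice : List (List Int)) (out : List Int) : Decidable (Spec_solution dice out) := by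
  unfold Spec_solution; infer_instance

-- ===== CLAIM (what is proved, stated in full; the proofs are below) =====
def Claim_equal_solution : Prop := ∀ (dice : List (List Int)), Dom_solution dice → Pre_solution dice → Spec_solution dice (solution dice)

-- ===== LEMMAS AND PROOFS =====

def lkp (dice : List (List Int)) (i : Int) : List Int := PySem.List.pyGetD dice (i-1) []

def conv1 (X : List Int) (die : List Int) : List Int := X.flatMap (fun s => die.map (fun f => s + f))

def prodSums (L : List (List Int)) : List Int := (pyProd L).map List.sum

-- d is a dict of counts representing the multiset X of sums
def DRep (d : PySem.Dict Int Int) (X : List Int) : Prop :=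
  d.keys.Nodup ∧ (∀ v, d.getD v 0 = (X.count v : Int)) ∧ (∀ v, v ∈ d.keys ↔ v ∈ X)

def stepCore (d : PySem.Dict Int Int) (die : List Int) : PySem.Dict Int Int :=
  d.items.foldl (fun nd p => die.foldl (fun nd f => nd.modify (p.1 + f) 0 (· + p.2)) nd)
    PySem.Dict.empty

lemma aux_sum_flatMap {α M : Type} [AddCommMonoid M] (l : List α) (g : α → List M) :
    (l.flatMap g).sum = (l.map (fun x => (g x).sum)).sum := by
  induction l with
  | nil => rfl
  | cons a t ih => simp [List.flatMap_cons, List.sum_append, ih]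

lemma aux_sum_filter (l : List (Int × Int)) (p : Int × Int → Bool) (g : Int × Int → Int) :
    ((l.filter p).map g).sum = (l.map (fun x => if p x then g x else 0)).sum := by
  induction l with
  | nil => rfl
  | cons a t ih => by_cases h : p a <;> simp [h, ih]

lemma flatten_modify (l : List (Int × Int)) (die : List Int) (nd : PySem.Dict Int Int) :
    l.foldl (fun nd p => die.foldl (fun nd f => nd.modify (p.1 + f) 0 (· + p.2)) nd) nd
      = (l.flatMap (fun p => die.map (fun f => (p.1 + f, p.2)))).foldl
          (fun nd kc => nd.modify kc.1 0 (· + kc.2)) nd := by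
  induction l generalizing nd with
  | nil => rfl
  | cons p t ih =>
      simp only [List.foldl_cons, List.flatMap_cons, List.foldl_append, List.foldl_map]
      exact ih _

lemma getD_weighted (ps : List (Int × Int)) (nd : PySem.Dict Int Int) (v : Int) :
    (ps.foldl (fun nd kc => nd.modify kc.1 0 (· + kc.2)) nd).getD v 0
      = nd.getD v 0 + ((ps.filter (fun kc => kc.1 == v)).map (fun kc => kc.2)).sum := by
  induction ps generalizing nd with
  | nil => simp
  | cons kc t ih =>
      simp only [List.foldl_cons, ih, List.filter_cons]
      rw [PySem.Dict.getD_modify]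
      by_cases h : kc.1 = v
      · simp [h]; ring
      · simp [h, Ne.symm h]

lemma count_singleton_int (a b : Int) : List.count a [b] = if a = b then 1 else 0 := by
  by_cases h : a = b <;> simp [h, eq_comm]

lemma count_map_add (die : List Int) (s v : Int) :
    (die.map (fun f => s + f)).count v = die.count (v - s) := by
  rw [show v = s + (v - s) by ring]
  rw [List.count_map_of_injective _ _ (fun a b h => by omega)]
  congr 1; ring

lemma count_conv1 (X die : List Int) (v : Int) :
    (conv1 X die).count v = (X.map (fun s => die.count (v - s))).sum := by
  unfold conv1
  rw [List.count_flatMap]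
  exact congrArg _ (List.map_congr_left (fun s _ => count_map_add die s v))

lemma prodSums_cons (L : List (List Int)) (l : List Int) :
    prodSums (l :: L) = l.flatMap (fun f => (prodSums L).map (fun s => f + s)) := by
  unfold prodSums
  simp only [pyProd, List.map_flatMap, List.map_map]
  exact List.flatMap_congr (fun f _ => List.map_congr_left (fun t _ => by simp))

lemma count_prodSums_cons (l : List Int) (L : List (List Int)) (v : Int) :
    (prodSums (l :: L)).count v = (l.map (fun f => (prodSums L).count (v - f))).sum := by
  rw [prodSums_cons, List.count_flatMap]
  exact congrArg _ (List.map_congr_left (fun f _ => count_map_add _ f v))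

lemma count_fold_conv1 (L : List (List Int)) (X : List Int) (v : Int) :
    (L.foldl conv1 X).count v = (X.map (fun s => (prodSums L).count (v - s))).sum := by
  induction L generalizing X with
  | nil =>
      simp only [List.foldl_nil]
      have h0 : ∀ s : Int, (prodSums []).count (v - s)
          = if (fun s => decide (s = v)) s then 1 else 0 := by
        intro s
        show List.count (v - s) [0] = _
        rw [count_singleton_int]
        by_cases h : s = v
        · rw [if_pos (show v - s = 0 by omega), if_pos (by simp [h])]
        · rw [if_neg (by omega), if_neg (by simp [h])]
      rw [List.map_congr_left (fun s _ => h0 s), PySem.List.sum_map_ite_one_zero_nat]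
      rw [List.count_eq_countP]
      exact List.countP_congr (fun x _ => by rw [Bool.eq_iff_iff]; simp)
  | cons die L' ih =>
      simp only [List.foldl_cons]
      rw [ih]
      unfold conv1
      rw [List.map_flatMap, aux_sum_flatMap]
      refine congrArg _ (List.map_congr_left (fun s _ => ?_))
      rw [count_prodSums_cons]
      simp only [List.map_map]
      refine congrArg _ (List.map_congr_left (fun f _ => ?_))
      show (prodSums L').count (v - (s + f)) = (prodSums L').count (v - s - f)
      congr 1; ring

-- grouping: summing g over the multiset X = summing count * g over its distinct keys
lemma group_sum (K : List Int) (g : Int → Int) :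
    ∀ X : List Int, K.Nodup → (∀ v, v ∈ K ↔ v ∈ X) →
      (K.map (fun k => (X.count k : Int) * g k)).sum = (X.map g).sum := by
  induction K with
  | nil =>
      intro X _ hmem
      have : X = [] := List.eq_nil_iff_forall_not_mem.2 (fun a ha => by simp [← hmem a] at ha)
      simp [this]
  | cons k K' ih =>
      intro X hnd hmem
      have hk : k ∉ K' := (List.nodup_cons.1 hnd).1
      have hnd' : K'.Nodup := (List.nodup_cons.1 hnd).2
      have hperm := List.filter_append_perm (fun x => x == k) X
      have hsum : ((X.filter (fun x => x == k)).map g).sum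
          + ((X.filter (fun x => !(x == k))).map g).sum = (X.map g).sum := by
        rw [← List.sum_append, ← List.map_append]
        exact List.Perm.sum_eq (hperm.map g)
      have h1 : ((X.filter (fun x => x == k)).map g).sum = (X.count k : Int) * g k := by
        rw [List.filter_beq, List.map_replicate, List.sum_replicate_int]
      have hX' : ∀ v, v ∈ K' ↔ v ∈ X.filter (fun x => !(x == k)) := by
        intro v
        constructor
        · intro hv
          have hvk : v ≠ k := fun h => hk (h ▸ hv)
          exact List.mem_filter.2 ⟨(hmem v).1 (by simp [hv]), by simp [hvk]⟩
        · intro hv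
          rcases List.mem_filter.1 hv with ⟨hvX, hne⟩
          rcases List.mem_cons.1 ((hmem v).2 hvX) with h | h
          · exact absurd h (by simpa using hne)
          · exact h
      have hc : ∀ v ∈ K', (X.filter (fun x => !(x == k))).count v = X.count v := by
        intro v hv
        have hvk : v ≠ k := fun h => hk (h ▸ hv)
        exact List.count_filter (by simp [hvk])
      have hrw : (K'.map (fun v => (X.count v : Int) * g v)).sum
          = (K'.map (fun v => ((X.filter (fun x => !(x == k))).count v : Int) * g v)).sum :=
        congrArg _ (List.map_congr_left (fun v hv => by rw [hc v hv]))
      simp only [List.map_cons, List.sum_cons]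
      rw [hrw, ih _ hnd' hX', ← hsum, h1]

lemma stepCore_getD (d : PySem.Dict Int Int) (die : List Int) (v : Int) :
    (stepCore d die).getD v 0
      = (d.items.map (fun p => p.2 * (die.count (v - p.1) : Int))).sum := by
  unfold stepCore
  rw [flatten_modify, getD_weighted]
  rw [PySem.Dict.getD_empty, zero_add]
  have hfm : (d.items.flatMap (fun p => die.map (fun f => (p.1 + f, p.2)))).filter
        (fun kc => kc.1 == v)
      = d.items.flatMap (fun p => (die.map (fun f => (p.1 + f, p.2))).filter (fun kc => kc.1 == v)) := by
    induction d.items with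
    | nil => rfl
    | cons a t ih => simp [List.flatMap_cons, List.filter_append, ih]
  rw [hfm, List.map_flatMap, aux_sum_flatMap]
  refine congrArg _ (List.map_congr_left (fun p _ => ?_))
  rw [List.filter_map]
  simp only [List.map_map]
  have h2 : ((die.filter ((fun kc : Int × Int => kc.1 == v) ∘ fun f => (p.1 + f, p.2))).map
      ((fun q : Int × Int => q.2) ∘ fun f => (p.1 + f, p.2))).sum
      = ((die.filter (fun f => p.1 + f == v)).map (fun _ => p.2)).sum := rfl
  rw [h2, List.map_const', List.sum_replicate_int]
  have h3 : (die.filter (fun f => p.1 + f == v)).length = die.count (v - p.1) := by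
    rw [List.count_eq_countP, ← List.countP_eq_length_filter]
    exact List.countP_congr (fun x _ => by constructor <;> (intro h; simp at h ⊢; omega))
  rw [h3]; ring

lemma rep_counter (X : List Int) : DRep (PySem.Dict.counter X) X :=
  ⟨PySem.Dict.nodup_keys_counter X,
   fun v => PySem.Dict.getD_counter X v,
   fun v => by rw [PySem.Dict.keys_counter]; exact PySem.Set.mem_ofList X v⟩

lemma rep_d0 : DRep (PySem.Dict.empty.insert (0:Int) (1:Int)) [0] := by
  have hk : (PySem.Dict.empty.insert (0:Int) (1:Int)).keys = [0] := rfl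
  refine ⟨by rw [hk]; simp, fun v => ?_, fun v => by rw [hk]⟩
  by_cases h : v = 0
  · subst h
    rw [PySem.Dict.getD_insert_self]
    simp
  · rw [PySem.Dict.getD_insert, if_neg h, PySem.Dict.getD_empty, count_singleton_int,
      if_neg h]
    simp

lemma rep_step (d : PySem.Dict Int Int) (X die : List Int) (h : DRep d X) :
    DRep (stepCore d die) (conv1 X die) := by
  obtain ⟨hnd, hcnt, hmem⟩ := h
  have hflat : stepCore d die
      = (d.items.flatMap (fun p => die.map (fun f => (p.1 + f, p.2)))).foldl
          (fun nd kc => nd.modify kc.1 0 (· + kc.2)) PySem.Dict.empty := by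
    unfold stepCore; exact flatten_modify _ _ _
  refine ⟨?_, ?_, ?_⟩
  · rw [hflat]
    exact PySem.Dict.nodup_keys_foldl_modify_key _ (fun kc : Int × Int => kc.1) 0
      (fun _ kc => (· + kc.2)) _ PySem.Dict.nodup_keys_empty
  · intro v
    rw [stepCore_getD]
    rw [PySem.Dict.items_eq_map_keys d hnd 0, List.map_map]
    have h4 : (d.keys.map ((fun p : Int × Int => p.2 * (die.count (v - p.1) : Int))
        ∘ fun k => (k, d.getD k 0))).sum
        = (d.keys.map (fun k => (X.count k : Int) * (die.count (v - k) : Int))).sum :=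
      congrArg _ (List.map_congr_left (fun k _ => by simp [hcnt k]))
    rw [h4, group_sum d.keys (fun k => (die.count (v - k) : Int)) X hnd hmem]
    rw [count_conv1, Nat.cast_list_sum, List.map_map]
    rfl
  · intro v
    rw [hflat, PySem.Dict.keys_foldl_modify_key _ (fun kc : Int × Int => kc.1) 0
      (fun _ kc => (· + kc.2)) (PySem.Dict.empty : PySem.Dict Int Int)]
    have h5 : PySem.Set.update (PySem.Dict.empty : PySem.Dict Int Int).keys
        ((d.items.flatMap (fun p => die.map (fun f => (p.1 + f, p.2)))).map (fun kc => kc.1))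
        = PySem.Set.ofList ((d.items.flatMap (fun p => die.map (fun f => (p.1 + f, p.2)))).map (fun kc => kc.1)) := rfl
    rw [h5, PySem.Set.mem_ofList]
    constructor
    · intro hv
      rcases List.mem_map.1 hv with ⟨kc, hkc, rfl⟩
      rcases List.mem_flatMap.1 hkc with ⟨p, hp, hkc2⟩
      rcases List.mem_map.1 hkc2 with ⟨f, hf, rfl⟩
      exact List.mem_flatMap.2 ⟨p.1, (hmem p.1).1 (PySem.Dict.mem_keys_of_mem_items d hp),
        List.mem_map.2 ⟨f, hf, rfl⟩⟩
    · intro hv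
      rcases List.mem_flatMap.1 hv with ⟨s, hs, hv2⟩
      rcases List.mem_map.1 hv2 with ⟨f, hf, rfl⟩
      rcases List.mem_map.1 ((hmem s).2 hs) with ⟨p, hp, rfl⟩
      exact List.mem_map.2 ⟨(p.1 + f, p.2), List.mem_flatMap.2 ⟨p, hp, List.mem_map.2 ⟨f, hf, rfl⟩⟩, rfl⟩

lemma rep_fold (L : List (List Int)) (d : PySem.Dict Int Int) (X : List Int) (h : DRep d X) :
    DRep (L.foldl stepCore d) (L.foldl conv1 X) := by
  induction L generalizing d X with
  | nil => exact h
  | cons die L' ih => exact ih _ _ (rep_step d X die h)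

lemma rep_ext (d : PySem.Dict Int Int) (X X' : List Int) (h : DRep d X)
    (hc : ∀ v, X.count v = X'.count v) : DRep d X' := by
  obtain ⟨hnd, hcnt, hmem⟩ := h
  refine ⟨hnd, fun v => by rw [hcnt v, hc v], fun v => ?_⟩
  rw [hmem v, ← List.count_pos_iff, ← List.count_pos_iff, hc v]

lemma rep_dist (dice : List (List Int)) (idxs : List Int) :
    DRep (distB dice idxs) (prodSums (idxs.map (lkp dice))) := by
  have h1 : distB dice idxs
      = (idxs.map (lkp dice)).foldl stepCore (PySem.Dict.empty.insert 0 1) := by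
    unfold distB
    rw [List.foldl_map]
    rfl
  rw [h1]
  refine rep_ext _ _ _ (rep_fold _ _ [0] rep_d0) (fun v => ?_)
  rw [count_fold_conv1]
  simp

-- counting-pairs swap: #{(a,b) ∈ X×Y | a < b} counted from X = counted from Y
lemma swap_pairs (X Y : List Int) :
    (X.map (fun a => ((Y.countP (fun b => a < b)) : Int))).sum
      = (Y.map (fun b => ((X.countP (fun a => a < b)) : Int))).sum := by
  induction X with
  | nil => simp
  | cons a X' ih =>
      simp only [List.map_cons, List.sum_cons, ih]
      have h6 : ∀ b : Int, ((List.countP (fun a' => decide (a' < b)) (a :: X') : Nat) : Int)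
          = (if (fun b => decide (a < b)) b then (1:Int) else 0)
            + (X'.countP (fun a' => decide (a' < b)) : Int) := by
        intro b
        rw [List.countP_cons]
        by_cases h : a < b <;> simp [h]
        omega
      rw [List.map_congr_left (fun b _ => h6 b), PySem.List.sum_map_add_int,
        PySem.List.sum_map_ite_one_zero]
      try ring

lemma rep_wins (dA dB : PySem.Dict Int Int) (X Y : List Int)
    (hA : DRep dA X) (hB : DRep dB Y) :
    winsAB dA dB = (pairsGT X Y, pairsGT Y X) := by
  obtain ⟨hndA, hcntA, hmemA⟩ := hA
  obtain ⟨hndB, hcntB, hmemB⟩ := hB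
  have inner : ∀ (p : Int → Int → Bool) (k : Int),
      ((dB.items.filter (fun q => p k q.1)).map (fun q => q.2)).sum
        = (Y.map (fun b => if p k b then (1:Int) else 0)).sum := by
    intro p k
    rw [aux_sum_filter, PySem.Dict.items_eq_map_keys dB hndB 0, List.map_map]
    have h7 : (dB.keys.map ((fun x : Int × Int => if p k x.1 then x.2 else 0)
        ∘ fun k' => (k', dB.getD k' 0))).sum
        = (dB.keys.map (fun k' => (Y.count k' : Int) * (if p k k' then (1:Int) else 0))).sum := by
      refine congrArg _ (List.map_congr_left (fun k' _ => ?_))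
      by_cases h : p k k' <;> simp [h, hcntB k']
    rw [h7, group_sum dB.keys _ Y hndB hmemB]
  have outer : ∀ (g : Int → Int),
      (dA.items.map (fun pr => pr.2 * g pr.1)).sum = (X.map g).sum := by
    intro g
    rw [PySem.Dict.items_eq_map_keys dA hndA 0, List.map_map]
    have h8 : (dA.keys.map ((fun pr : Int × Int => pr.2 * g pr.1) ∘ fun k => (k, dA.getD k 0))).sum
        = (dA.keys.map (fun k => (X.count k : Int) * g k)).sum :=
      congrArg _ (List.map_congr_left (fun k _ => by simp [hcntA k]))
    rw [h8, group_sum dA.keys g X hndA hmemA]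
  unfold winsAB
  have e1 : (dA.items.map (fun p => p.2 * ((dB.items.filter (fun q => q.1 < p.1)).map (fun q => q.2)).sum)).sum
      = pairsGT X Y := by
    have h9 : ∀ pr ∈ dA.items, pr.2 * ((dB.items.filter (fun q => q.1 < pr.1)).map (fun q => q.2)).sum
        = pr.2 * ((Y.countP (fun b => b < pr.1) : Nat) : Int) := by
      intro pr _
      rw [inner (fun k b => decide (b < k)) pr.1, PySem.List.sum_map_ite_one_zero]
    rw [List.map_congr_left h9, outer (fun a => ((Y.countP (fun b => b < a) : Nat) : Int))]
    rfl
  have e2 : (dA.items.map (fun p => p.2 * ((dB.items.filter (fun q => p.1 < q.1)).map (fun q => q.2)).sum)).sum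
      = pairsGT Y X := by
    have h10 : ∀ pr ∈ dA.items, pr.2 * ((dB.items.filter (fun q => pr.1 < q.1)).map (fun q => q.2)).sum
        = pr.2 * ((Y.countP (fun b => pr.1 < b) : Nat) : Int) := by
      intro pr _
      rw [inner (fun k b => decide (k < b)) pr.1, PySem.List.sum_map_ite_one_zero]
    rw [List.map_congr_left h10, outer (fun a => ((Y.countP (fun b => a < b) : Nat) : Int))]
    rw [swap_pairs]
    rfl
  rw [e1, e2]

lemma winsLoopA_eq_winsAB (dA dB : PySem.Dict Int Int) : winsLoopA dA dB = winsAB dA dB := by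
  unfold winsLoopA winsAB
  have hin : ∀ (p : Int × Int) (w : Int × Int),
      dB.items.foldl (fun w q =>
        if p.1 > q.1 then (w.1 + p.2 * q.2, w.2)
        else if p.1 < q.1 then (w.1, w.2 + p.2 * q.2)
        else w) w
      = (w.1 + ((dB.items.filter (fun q => q.1 < p.1)).map (fun q => p.2 * q.2)).sum,
         w.2 + ((dB.items.filter (fun q => p.1 < q.1)).map (fun q => p.2 * q.2)).sum) := by
    intro p w
    have hfun : (fun (w : Int × Int) (q : Int × Int) =>
        if p.1 > q.1 then (w.1 + p.2 * q.2, w.2)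
        else if p.1 < q.1 then (w.1, w.2 + p.2 * q.2)
        else w)
        = (fun w q => (if q.1 < p.1 then w.1 + p.2 * q.2 else w.1,
                       if p.1 < q.1 then w.2 + p.2 * q.2 else w.2)) := by
      funext w q
      rcases lt_trichotomy p.1 q.1 with h | h | h
      · rw [if_neg (by omega : ¬ p.1 > q.1), if_pos h, if_neg (by omega), if_pos h]
      · rw [if_neg (by omega : ¬ p.1 > q.1), if_neg (by omega), if_neg (by omega),
          if_neg (by omega)]
      · rw [if_pos (by omega : p.1 > q.1), if_pos h, if_neg (by omega)]
    rw [hfun, PySem.List.foldl_prod_mk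
      (f := fun a (q : Int × Int) => if q.1 < p.1 then a + p.2 * q.2 else a)
      (g := fun b (q : Int × Int) => if p.1 < q.1 then b + p.2 * q.2 else b)]
    rw [PySem.List.foldl_ite_eq_foldl_filter, PySem.List.foldl_ite_eq_foldl_filter,
      PySem.List.foldl_add, PySem.List.foldl_add]
  refine Eq.trans (PySem.List.foldl_congr_mem _ _ _ _ (fun w p _ => hin p w)) ?_
  rw [PySem.List.foldl_prod_mk
    (f := fun a (p : Int × Int) =>
      a + ((dB.items.filter (fun q => decide (q.1 < p.1))).map (fun q => p.2 * q.2)).sum)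
    (g := fun b (p : Int × Int) =>
      b + ((dB.items.filter (fun q => decide (p.1 < q.1))).map (fun q => p.2 * q.2)).sum)]
  rw [PySem.List.foldl_add, PySem.List.foldl_add, zero_add, zero_add]
  congr 1
  · exact congrArg List.sum (List.map_congr_left (fun p _ => List.sum_map_mul_left _ _ _))
  · exact congrArg List.sum (List.map_congr_left (fun p _ => List.sum_map_mul_left _ _ _))

lemma diceB_eq (c : List Int) (n : Int) :
    PySem.Set.diff (PySem.Set.ofList (PySem.List.pyRange 1 (n+1) 1)) (PySem.Set.ofList c)
      = (PySem.List.pyRange 1 (n+1) 1).filter (fun i => !(c.contains i)) := by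
  rw [PySem.Set.ofList_eq_self_of_nodup _ (PySem.List.nodup_pyRange_one 1 (n+1))]
  show List.filter _ _ = List.filter _ _
  refine List.filter_congr (fun x _ => ?_)
  have : (PySem.Set.ofList c).contains x = c.contains x := by
    rw [Bool.eq_iff_iff]; simp [PySem.Set.mem_ofList]
  rw [this]

-- per-case equality of the two loop bodies
lemma caseStep_eq (dice : List (List Int)) (n : Int) (st : Int × Option (List Int)) (c : List Int) :
    caseStepA dice n st c = caseStepB dice n st c := by
  have hw : ∀ ca cb : List Int,
      winsLoopA
          (PySem.Dict.counter ((pyProd (ca.map (fun d => PySem.List.pyGetD dice (d-1) []))).map List.sum))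
          (PySem.Dict.counter ((pyProd (cb.map (fun d => PySem.List.pyGetD dice (d-1) []))).map List.sum))
        = winsAB (distB dice ca) (distB dice cb) := by
    intro ca cb
    rw [winsLoopA_eq_winsAB,
      rep_wins _ _ _ _ (rep_counter _) (rep_counter _),
      rep_wins _ _ _ _ (rep_dist dice ca) (rep_dist dice cb)]
    rfl
  simp only [caseStepA, caseStepB]
  rw [diceB_eq, hw]

theorem solution_eq (dice : List (List Int)) : solution dice = solution_alt dice := by
  have h : caseStepA dice (dice.length : Int) = caseStepB dice (dice.length : Int) :=
    funext fun st => funext fun c => caseStep_eq dice _ st c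
  simp only [solution, solution_alt, h]

-- ===== VERDICT (by name: the statement is the Claim_ definition above) =====
theorem solution_spec : Claim_equal_solution := by
  intro dice _ _
  unfold Spec_solution
  exact solution_eq dice
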